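-- pv_equiv track=rewrite | github.com/vivi2053/CTCI | Arrays_and_Strings/check_permutation.py | cp_hashmap
-- ===== SOURCE A (Python) =====
-- from collections import defaultdict
--
-- def cp_hashmap(string_tup):
--     s1, s2 = string_tup
--     if len(s1) != len(s2):
--         return False
--     hash1, hash2 = defaultdict(int),  defaultdict(int)
--     for c in s1:
--         hash1[c] += 1
--     for c in s2:
--         hash2[c] += 1
--
--     if hash1 == hash2:
--         return True
--     else:
--         return False
-- ===== SOURCE B (Python) =====
-- def cp_hashmap(string_tup):
--     s1, s2 = string_tup
--     return sorted(s1) == sorted(s2)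
-- ===== Notes on version B (the rewrite author's own statement) =====
-- stated objective: simpler
-- what changed: Replaces the length check plus two defaultdict frequency-counting loops and dict comparison with a single sort-and-compare: sorted(s1) == sorted(s2).
import Mathlib
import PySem

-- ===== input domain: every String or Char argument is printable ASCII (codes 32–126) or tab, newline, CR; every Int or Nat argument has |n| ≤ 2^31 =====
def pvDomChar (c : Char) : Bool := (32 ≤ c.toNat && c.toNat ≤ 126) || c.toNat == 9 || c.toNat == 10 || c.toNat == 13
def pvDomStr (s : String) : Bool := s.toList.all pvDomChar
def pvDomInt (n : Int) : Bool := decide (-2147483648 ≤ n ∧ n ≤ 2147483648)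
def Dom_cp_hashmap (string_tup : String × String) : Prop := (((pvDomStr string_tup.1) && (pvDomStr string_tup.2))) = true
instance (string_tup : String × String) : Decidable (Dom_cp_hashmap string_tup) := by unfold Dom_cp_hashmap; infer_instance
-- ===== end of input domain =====

-- B replaces the two frequency-counting loops and the dict comparison by sorted(s1) == sorted(s2) (simpler, one expression).

-- ===== PORT A =====
-- Python's dict == ignores insertion order: compare keys as a set via get? on both sides.
def pyDictEq (d1 d2 : PySem.Dict Char Int) : Bool :=
  (d1.keys.all (fun k => d1.get? k == d2.get? k)) &&
  (d2.keys.all (fun k => d2.get? k == d1.get? k))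

def cp_hashmap (string_tup : String × String) : Bool :=
  let s1 := string_tup.1.toList
  let s2 := string_tup.2.toList
  if s1.length ≠ s2.length then false
  else
    let hash1 := s1.foldl (fun d c => d.modify c 0 (· + 1)) (PySem.Dict.empty : PySem.Dict Char Int)
    let hash2 := s2.foldl (fun d c => d.modify c 0 (· + 1)) (PySem.Dict.empty : PySem.Dict Char Int)
    if pyDictEq hash1 hash2 then true else false

-- ===== PORT B =====
def cp_hashmap_alt (string_tup : String × String) : Bool :=
  PySem.List.sorted string_tup.1.toList (fun x => x) false ==
  PySem.List.sorted string_tup.2.toList (fun x => x) false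

-- ===== PRECONDITION & SPEC =====
def Spec_cp_hashmap (string_tup : String × String) (out : Bool) : Prop := out = cp_hashmap_alt string_tup
instance (string_tup : String × String) (out : Bool) : Decidable (Spec_cp_hashmap string_tup out) := by unfold Spec_cp_hashmap; infer_instance

-- ===== CLAIM (what is proved, stated in full; the proofs are below) =====
def Claim_equal_cp_hashmap : Prop := ∀ (string_tup : String × String), Dom_cp_hashmap string_tup → Spec_cp_hashmap string_tup (cp_hashmap string_tup)

-- ===== LEMMAS AND PROOFS =====

-- get? on a counter: some count inside the list, none outside.
theorem get?_counter_char (xs : List Char) (a : Char) :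
    (PySem.Dict.counter xs).get? a = if a ∈ xs then some ((xs.count a : Int)) else none := by
  by_cases h : a ∈ xs
  · simp only [h, if_true]
    have hk : a ∈ (PySem.Dict.counter xs).keys := by
      rw [PySem.Dict.keys_counter]; exact (PySem.Set.mem_ofList xs a).mpr h
    have hne : (PySem.Dict.counter xs).get? a ≠ none := by
      intro hn
      exact ((PySem.Dict.get?_eq_none_iff_not_mem_keys _ _).mp hn) hk
    rcases ho : (PySem.Dict.counter xs).get? a with _ | v
    · exact absurd ho hne
    · have := PySem.Dict.getD_counter xs a
      rw [PySem.Dict.getD_eq_get?_getD, ho] at this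
      simp only [Option.getD_some] at this
      rw [this]
  · simp only [h, if_false]
    rw [PySem.Dict.get?_eq_none_iff_not_mem_keys, PySem.Dict.keys_counter]
    intro hk
    exact h ((PySem.Set.mem_ofList xs a).mp hk)

theorem get?_counter_eq_iff (xs ys : List Char) (a : Char) :
    (PySem.Dict.counter xs).get? a = (PySem.Dict.counter ys).get? a ↔ xs.count a = ys.count a := by
  rw [get?_counter_char, get?_counter_char]
  by_cases h1 : a ∈ xs <;> by_cases h2 : a ∈ ys
  · rw [if_pos h1, if_pos h2]; simp
  · rw [if_pos h1, if_neg h2]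
    have hc : ys.count a = 0 := List.count_eq_zero.mpr h2
    have hx : xs.count a ≠ 0 := by simpa [List.count_eq_zero] using h1
    exact ⟨fun h => absurd h (by simp), fun h => absurd (h.trans hc) hx⟩
  · rw [if_neg h1, if_pos h2]
    have hc : xs.count a = 0 := List.count_eq_zero.mpr h1
    have hy : ys.count a ≠ 0 := by simpa [List.count_eq_zero] using h2
    exact ⟨fun h => absurd h (by simp), fun h => absurd (h.symm.trans hc) hy⟩
  · rw [if_neg h1, if_neg h2, List.count_eq_zero.mpr h1, List.count_eq_zero.mpr h2]
    simp

theorem pyDictEq_counter_iff (xs ys : List Char) :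
    pyDictEq (PySem.Dict.counter xs) (PySem.Dict.counter ys) = true ↔ xs.Perm ys := by
  rw [List.perm_iff_count]
  unfold pyDictEq
  simp only [Bool.and_eq_true, List.all_eq_true, beq_iff_eq]
  constructor
  · rintro ⟨h1, h2⟩ a
    by_cases hx : a ∈ xs
    · exact (get?_counter_eq_iff xs ys a).mp
        (h1 a (by rw [PySem.Dict.keys_counter]; exact (PySem.Set.mem_ofList xs a).mpr hx))
    · by_cases hy : a ∈ ys
      · exact ((get?_counter_eq_iff ys xs a).mp
          (h2 a (by rw [PySem.Dict.keys_counter]; exact (PySem.Set.mem_ofList ys a).mpr hy))).symm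
      · rw [List.count_eq_zero.mpr hx, List.count_eq_zero.mpr hy]
  · intro h
    refine ⟨fun a _ => (get?_counter_eq_iff xs ys a).mpr (h a),
            fun a _ => (get?_counter_eq_iff ys xs a).mpr (h a).symm⟩

theorem cp_hashmap_true_iff (t : String × String) :
    cp_hashmap t = true ↔ t.1.toList.Perm t.2.toList := by
  have he : cp_hashmap t =
      (if t.1.toList.length ≠ t.2.toList.length then false
       else if pyDictEq (PySem.Dict.counter t.1.toList) (PySem.Dict.counter t.2.toList) then true
       else false) := by
    rw [PySem.Dict.counter_eq_foldl, PySem.Dict.counter_eq_foldl]; rfl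
  rw [he]
  by_cases hl : t.1.toList.length = t.2.toList.length
  · rw [if_neg (by simp [hl])]
    by_cases hd : pyDictEq (PySem.Dict.counter t.1.toList) (PySem.Dict.counter t.2.toList) = true
    · simp only [hd, if_true, true_iff]
      exact (pyDictEq_counter_iff _ _).mp hd
    · simp [hd]
      exact fun hp => hd ((pyDictEq_counter_iff _ _).mpr hp)
  · rw [if_pos hl]
    exact ⟨fun h => by simp at h, fun h => absurd h.length_eq hl⟩

theorem cp_hashmap_alt_true_iff (t : String × String) :
    cp_hashmap_alt t = true ↔ t.1.toList.Perm t.2.toList := by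
  unfold cp_hashmap_alt
  rw [beq_iff_eq]
  exact PySem.List.sorted_id_eq_sorted_id_iff_perm _ _

-- ===== VERDICT (by name: the statement is the Claim_ definition above) =====
theorem cp_hashmap_spec : Claim_equal_cp_hashmap := by
  intro t _
  unfold Spec_cp_hashmap
  rw [Bool.eq_iff_iff, cp_hashmap_true_iff, cp_hashmap_alt_true_iff]
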